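-- pv_equiv track=rewrite | github.com/Patrick-Mertens/Game_Theory_Code | legacy_code_part/VG_Functions.py | Detect_Trend_Of_Data
-- ===== SOURCE A (Python) =====
-- def Detect_Trend_Of_Data(vector):
--     diff = []
--     for d in range(len(vector) - 1):
--         diff.append(vector[d + 1] - vector[
--             d])  # compute the difference between each 2 measurements, kind of like the slope in each intervañ
--     s_pos = 0
--     for x in diff:
--         if x > 0:
--             s_pos = s_pos + x  # if it is increasing, add the difference of measurements (so it measures the amount of centimeters that tumor grows)
--
--     s_neg = 0
--     for x in diff:
--         if x < 0:
--             s_neg = s_neg + x  # measures how much tumor decreases in total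
--
--     if all(i >= 0 for i in diff):  # if al intervals are increasing, Up
--         trend = 'Up'
--     elif all(i <= 0 for i in diff):  # if all intervals are decreasing, down
--         trend = 'Down'
--     elif diff[0] < 0 and (vector[-1] > vector[0] or (diff[-1] > -diff[0] / 2)) and (
--             max(vector) == vector[0] or max(vector) == vector[-1]):
--         trend = 'Evolution'
--     # elif diff[0]>0 and vector[-1]<= vector[0]:
--     #   trend = 'Delayed'
--     else:
--         trend = 'Fluctuate'
--
--     '''elif vector[0]< max(vector) and vector[-1]< max(vector):
--         trend = 'Delayed'
--
--     elif vector[0] >min(vector) and vector[-1] >min(vector) and vector[-1]> vector[0]/2: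
--         trend = 'Evolution'
--     else:
--       trend = 'Fluctuate'
--     elif diff[0] > 0 and not abs(s_neg) >= (s_pos /2): #if amount they decrease is smaller than half of the amount it increases, Up
--         trend = 'Up'
--     elif diff[0] < 0 and not s_pos >= (abs(s_neg) /2):
--         trend = 'Down'
--     else:
--         trend = 'Fluctuate'''
--     return trend
-- ===== SOURCE B (Python) =====
-- def Detect_Trend_Of_Data(vector):
--     # single pass: running max, monotone flags, first/last difference
--     if not vector:
--         return 'Up'
--     prev = vector[0]
--     mx = vector[0]
--     non_dec = True
--     non_inc = True
--     first_diff = None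
--     last_diff = 0
--     for x in vector[1:]:
--         d = x - prev
--         non_dec = non_dec and d >= 0
--         non_inc = non_inc and d <= 0
--         if first_diff is None:
--             first_diff = d
--         last_diff = d
--         if x > mx:
--             mx = x
--         prev = x
--     if non_dec:
--         return 'Up'
--     if non_inc:
--         return 'Down'
--     if first_diff < 0 and (prev > vector[0] or last_diff > -first_diff / 2) \
--             and (mx == vector[0] or mx == prev):
--         return 'Evolution'
--     return 'Fluctuate'
-- ===== Notes on version B (the rewrite author's own statement) =====
-- stated objective: simpler
-- what changed: Replaces the diff-list construction plus the dead s_pos/s_neg accumulators and the several scans (two all() passes, max(), repeated indexing) by one pass over vector that maintains a running maximum, two monotonicity flags and the first and last difference, then classifies from that state.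
import Mathlib
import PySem

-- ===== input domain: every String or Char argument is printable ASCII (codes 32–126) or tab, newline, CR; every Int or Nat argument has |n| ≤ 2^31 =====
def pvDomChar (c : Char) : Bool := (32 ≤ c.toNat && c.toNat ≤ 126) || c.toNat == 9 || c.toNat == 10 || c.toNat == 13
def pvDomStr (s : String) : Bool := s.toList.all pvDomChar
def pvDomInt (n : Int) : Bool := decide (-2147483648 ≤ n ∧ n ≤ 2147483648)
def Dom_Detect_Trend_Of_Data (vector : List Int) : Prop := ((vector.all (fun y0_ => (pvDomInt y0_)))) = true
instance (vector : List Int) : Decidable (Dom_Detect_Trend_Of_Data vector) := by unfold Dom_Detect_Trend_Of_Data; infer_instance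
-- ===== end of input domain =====

-- B collapses A's diff list, dead s_pos/s_neg accumulators and multiple scans into one pass
-- keeping running max, two monotonicity flags and the first/last difference (objective: simpler).

-- ===== PORT A =====
-- literal port; 'diff[-1] > -diff[0]/2' is ported as '2*diff[-1] > -diff[0]', exact here:
-- the comparison of an int with the exact half -diff[0]/2 (a dyadic rational, exact in Python's
-- float for |n| ≤ 2^31) is equivalent to comparing doubles.
def Detect_Trend_Of_Data (vector : List Int) : String :=
  let diff := (PySem.List.pyRange 0 ((vector.length : Int) - 1) 1).foldl
      (fun acc d => acc ++ [PySem.List.pyGetD vector (d + 1) 0 - PySem.List.pyGetD vector d 0]) []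
  let _s_pos := diff.foldl (fun s x => if x > 0 then s + x else s) (0 : Int)
  let _s_neg := diff.foldl (fun s x => if x < 0 then s + x else s) (0 : Int)
  if diff.all (fun i => decide (i ≥ 0)) then "Up"
  else if diff.all (fun i => decide (i ≤ 0)) then "Down"
  else if PySem.List.pyGetD diff 0 0 < 0 ∧
       (PySem.List.pyGetD vector (-1) 0 > PySem.List.pyGetD vector 0 0 ∨
        2 * PySem.List.pyGetD diff (-1) 0 > -(PySem.List.pyGetD diff 0 0)) ∧
       ((PySem.List.max? vector (fun y => y)).getD 0 = PySem.List.pyGetD vector 0 0 ∨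
        (PySem.List.max? vector (fun y => y)).getD 0 = PySem.List.pyGetD vector (-1) 0)
  then "Evolution"
  else "Fluctuate"

-- ===== PORT B =====
def Detect_Trend_Of_Data_alt (vector : List Int) : String :=
  match vector with
  | [] => "Up"
  | v0 :: rest =>
    let st := rest.foldl
      (fun (s : Int × Int × Bool × Bool × Option Int × Int) x =>
        let d := x - s.1
        (x,
         (if x > s.2.1 then x else s.2.1),
         s.2.2.1 && decide (d ≥ 0),
         s.2.2.2.1 && decide (d ≤ 0),
         (match s.2.2.2.2.1 with | none => some d | some f => some f),
         d))
      (v0, v0, true, true, none, 0)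
    if st.2.2.1 then "Up"
    else if st.2.2.2.1 then "Down"
    else if st.2.2.2.2.1.getD 0 < 0 ∧
         (st.1 > v0 ∨ 2 * st.2.2.2.2.2 > -(st.2.2.2.2.1.getD 0)) ∧
         (st.2.1 = v0 ∨ st.2.1 = st.1)
    then "Evolution"
    else "Fluctuate"

-- ===== PRECONDITION & SPEC =====
def Spec_Detect_Trend_Of_Data (vector : List Int) (out : String) : Prop := out = Detect_Trend_Of_Data_alt vector
instance (vector : List Int) (out : String) : Decidable (Spec_Detect_Trend_Of_Data vector out) := by unfold Spec_Detect_Trend_Of_Data; infer_instance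

-- ===== CLAIM (what is proved, stated in full; the proofs are below) =====
def Claim_equal_Detect_Trend_Of_Data : Prop := ∀ (vector : List Int), Dom_Detect_Trend_Of_Data vector → Spec_Detect_Trend_Of_Data vector (Detect_Trend_Of_Data vector)

-- ===== LEMMAS AND PROOFS =====

def dlist : List Int → List Int
  | a :: b :: t => (b - a) :: dlist (b :: t)
  | _ => []

theorem pyGetD_cons_succ' (a : Int) (xs : List Int) (k : Nat) (d : Int) :
    PySem.List.pyGetD (a :: xs) ((k : Int) + 1) d = PySem.List.pyGetD xs (k : Int) d := by
  rw [show ((k : Int) + 1) = ((k + 1 : Nat) : Int) by push_cast; ring,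
      PySem.List.pyGetD_natCast, PySem.List.pyGetD_natCast]
  simp

theorem map_range_dlist (v : List Int) :
    (List.range (v.length - 1)).map
      (fun (k : Nat) => PySem.List.pyGetD v ((k : Int) + 1) 0 - PySem.List.pyGetD v (k : Int) 0)
    = dlist v := by
  induction v with
  | nil => simp [dlist]
  | cons a t ih =>
    cases t with
    | nil => simp [dlist]
    | cons b r =>
      rw [show (a :: b :: r).length - 1 = r.length + 1 from rfl, List.range_succ_eq_map]
      simp only [List.map_cons, List.map_map, dlist]
      refine List.cons_eq_cons.mpr ⟨?_, ?_⟩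
      · rw [show ((0:Nat) : Int) + 1 = ((0:Nat) : Int) + 1 from rfl, pyGetD_cons_succ']
        simp
      · rw [← ih, show (b :: r).length - 1 = r.length from rfl]
        apply List.map_congr_left
        intro k _
        simp only [Function.comp_apply]
        rw [show ((Nat.succ k : Nat) : Int) + 1 = ((k + 1 : Nat) : Int) + 1 by push_cast; ring,
            pyGetD_cons_succ',
            show ((Nat.succ k : Nat) : Int) = ((k : Nat) : Int) + 1 by push_cast; ring,
            pyGetD_cons_succ', pyGetD_cons_succ']

theorem diff_eq_dlist (v : List Int) :
    (PySem.List.pyRange 0 ((v.length : Int) - 1) 1).foldl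
      (fun acc d => acc ++ [PySem.List.pyGetD v (d + 1) 0 - PySem.List.pyGetD v d 0]) []
    = dlist v := by
  rw [PySem.List.foldl_append_singleton_eq_map, PySem.List.pyRange_one]
  rw [show (((v.length : Int) - 1) - 0).toNat = v.length - 1 by omega]
  rw [List.map_map, ← map_range_dlist v]
  simp only [List.nil_append]
  apply List.map_congr_left
  intro k _
  simp

theorem foldB (rest : List Int) (prev mx : Int) (nd ni : Bool) (fd : Option Int) (ld : Int) :
    rest.foldl
      (fun (s : Int × Int × Bool × Bool × Option Int × Int) x =>
        let d := x - s.1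
        (x,
         (if x > s.2.1 then x else s.2.1),
         s.2.2.1 && decide (d ≥ 0),
         s.2.2.2.1 && decide (d ≤ 0),
         (match s.2.2.2.2.1 with | none => some d | some f => some f),
         d))
      (prev, mx, nd, ni, fd, ld)
    = (rest.getLastD prev,
       rest.foldl (fun m x => if x > m then x else m) mx,
       nd && (dlist (prev :: rest)).all (fun i => decide (i ≥ 0)),
       ni && (dlist (prev :: rest)).all (fun i => decide (i ≤ 0)),
       (match fd with | none => (dlist (prev :: rest)).head? | some f => some f),
       (dlist (prev :: rest)).getLastD ld) := by
  induction rest generalizing prev mx nd ni fd ld with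
  | nil => cases fd <;> simp [dlist]
  | cons x r ih =>
    simp only [List.foldl_cons, ih, dlist, List.getLastD_cons]
    refine Prod.ext rfl (Prod.ext rfl ?_)
    refine Prod.ext ?_ (Prod.ext ?_ (Prod.ext ?_ ?_))
    · simp [List.all_cons, Bool.and_assoc]
    · simp [List.all_cons, Bool.and_assoc]
    · cases fd <;> cases h : dlist (x :: r) <;> simp
    · cases h : dlist (x :: r) <;> simp

theorem getLast_eq_getLastD' (l : List Int) (d : Int) (h : l ≠ []) :
    l.getLast h = l.getLastD d := by
  cases l with
  | nil => exact absurd rfl h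
  | cons q qs => rw [List.getLast_eq_getLastD, List.getLastD_cons]

theorem max_step_eq : (fun (m x : Int) => if x > m then x else m) = max := by
  funext m x
  by_cases h : x > m
  · simp [h, max_def]; omega
  · simp [h, max_def]; omega

theorem main_cons (v0 : Int) (rest : List Int) :
    Detect_Trend_Of_Data (v0 :: rest) = Detect_Trend_Of_Data_alt (v0 :: rest) := by
  have hv : (v0 :: rest) ≠ [] := by simp
  simp only [Detect_Trend_Of_Data, Detect_Trend_Of_Data_alt, foldB, diff_eq_dlist]
  by_cases h1 : (dlist (v0 :: rest)).all (fun i => decide (i ≥ 0)) = true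
  · simp [h1]
  · have hne : dlist (v0 :: rest) ≠ [] := by
      intro h; rw [h] at h1; simp at h1
    by_cases h2 : (dlist (v0 :: rest)).all (fun i => decide (i ≤ 0)) = true
    · simp [h1, h2]
    · have e0 : PySem.List.pyGetD (dlist (v0 :: rest)) 0 0
          = (dlist (v0 :: rest)).head?.getD 0 := by
        cases h : dlist (v0 :: rest) with
        | nil => simp [PySem.List.pyGetD_zero]
        | cons q qs => simp [PySem.List.pyGetD_zero_cons]
      have elast : PySem.List.pyGetD (dlist (v0 :: rest)) (-1) 0
          = (dlist (v0 :: rest)).getLastD 0 := by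
        rw [PySem.List.pyGetD_neg_one _ _ hne, getLast_eq_getLastD' _ 0 hne]
      have ev0 : PySem.List.pyGetD (v0 :: rest) 0 0 = v0 := PySem.List.pyGetD_zero_cons _ _ _
      have evl : PySem.List.pyGetD (v0 :: rest) (-1) 0 = rest.getLastD v0 := by
        rw [PySem.List.pyGetD_neg_one _ _ hv, List.getLast_eq_getLastD]
      have emax : (PySem.List.max? (v0 :: rest) (fun y => y)).getD 0
          = rest.foldl (fun m x => if x > m then x else m) v0 := by
        rw [PySem.List.max?_id_cons, max_step_eq]
        rfl
      simp only [h1, h2, e0, elast, ev0, evl, emax, Bool.true_and, if_false,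
        Bool.false_eq_true]

-- ===== VERDICT (by name: the statement is the Claim_ definition above) =====
theorem Detect_Trend_Of_Data_spec : Claim_equal_Detect_Trend_Of_Data := by
  intro vector _
  unfold Spec_Detect_Trend_Of_Data
  cases vector with
  | nil => rfl
  | cons v0 rest => exact main_cons v0 rest
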